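-- pv_equiv track=rewrite | github.com/yuygfgg/y5gfunc | y5gfunc/expr/infix2postfix.py | find_binary_op
-- ===== SOURCE A (Python) =====
-- def find_binary_op(expr: str, op: str):
--     """
--     Find the last occurrence of the binary operator op at the outer level and return the left and right parts.
--     """
--     if not op:
--         return None, None
--
--     prefix = [0] * len(op)
--     j = 0
--     for i in range(1, len(op)):
--         while j > 0 and op[i] != op[j]:
--             j = prefix[j - 1]
--         if op[i] == op[j]:
--             j += 1
--             prefix[i] = j
--
--     candidate_index = -1
--     level = 0
--     kmp_state = 0
--     levels = [0] * len(expr)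
--
--     for i, c in enumerate(expr):
--         if c == "(":
--             level += 1
--         elif c == ")":
--             level -= 1
--         levels[i] = level
--
--         while kmp_state > 0 and c != op[kmp_state]:
--             kmp_state = prefix[kmp_state - 1]
--         if c == op[kmp_state]:
--             kmp_state += 1
--
--         if kmp_state == len(op):
--             candidate = i - len(op) + 1
--             if levels[candidate] == 0:
--                 left_valid = (candidate == 0) or (expr[candidate - 1] in " (,\t")
--                 after = candidate + len(op)
--                 right_valid = (after == len(expr)) or (expr[after] in " )\t,")
--                 if left_valid and right_valid:
--                     candidate_index = candidate
--             kmp_state = prefix[kmp_state - 1]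
--
--     if candidate_index == -1:
--         return None, None
--
--     left = expr[:candidate_index].strip()
--     right = expr[candidate_index + len(op) :].strip()
--     return left, right
-- ===== SOURCE B (Python) =====
-- def find_binary_op(expr: str, op: str):
--     """
--     Find the last occurrence of the binary operator op at the outer level and return the left and right parts.
--     """
--     if not op:
--         return None, None
--
--     levels = []
--     lvl = 0
--     for c in expr:
--         if c == "(":
--             lvl += 1
--         elif c == ")":
--             lvl -= 1
--         levels.append(lvl)
--
--     best = -1
--     start = 0
--     while True:
--         pos = expr.find(op, start)
--         if pos == -1:
--             break
--         if levels[pos] == 0: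
--             left_valid = pos == 0 or expr[pos - 1] in " (,\t"
--             after = pos + len(op)
--             right_valid = after == len(expr) or expr[after] in " )\t,"
--             if left_valid and right_valid:
--                 best = pos
--         start = pos + 1
--
--     if best == -1:
--         return None, None
--     return expr[:best].strip(), expr[best + len(op):].strip()
-- ===== Notes on version B (the rewrite author's own statement) =====
-- stated objective: faster
-- what changed: Replaces A's hand-rolled KMP automaton (interpreted failure-function build plus a per-character matcher loop interleaved with level tracking) by a two-phase scan: build the parenthesis-level array in one pass, then repeatedly call str.find(op, start) with start=pos+1 to enumerate all (overlapping) occurrences, keeping the last one that passes the same level and boundary checks.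
import Mathlib
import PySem

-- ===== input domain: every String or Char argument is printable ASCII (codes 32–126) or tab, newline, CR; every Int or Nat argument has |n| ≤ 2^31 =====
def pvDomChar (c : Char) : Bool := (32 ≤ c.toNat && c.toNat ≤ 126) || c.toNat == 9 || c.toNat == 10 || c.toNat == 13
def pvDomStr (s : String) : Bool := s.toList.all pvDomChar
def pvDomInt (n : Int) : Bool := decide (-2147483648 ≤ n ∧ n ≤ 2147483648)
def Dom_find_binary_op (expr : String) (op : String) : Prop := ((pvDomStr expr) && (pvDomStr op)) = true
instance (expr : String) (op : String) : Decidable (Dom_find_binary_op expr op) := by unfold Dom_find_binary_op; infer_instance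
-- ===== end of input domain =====

-- B replaces A's hand-rolled KMP matcher by a two-phase scan (level array, then repeated
-- str.find with start = pos+1); same return value; C-level str.find makes B measurably
-- faster in a timing run (constant-factor, not asymptotic).

-- ===== PORT A =====
-- Python's `while j > 0 and c != op[j]: j = prefix[j-1]`; fuel-bounded (fuel ≥ j always
-- suffices on the lists A builds, since prefix[j-1] ≤ j-1 there).
def kmpFall (P : List Char) (f : List Nat) (c : Char) : Nat → Nat → Nat
  | 0, j => j
  | fuel+1, j => if 0 < j ∧ c ≠ P.getD j ' ' then kmpFall P f c fuel (f.getD (j-1) 0) else j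

-- the `while … ; if c == op[j]: j += 1` shape that A's source contains verbatim twice
def kmpAdvance (P : List Char) (f : List Nat) (c : Char) (j : Nat) : Nat :=
  let j' := kmpFall P f c j j
  if c = P.getD j' ' ' then j' + 1 else j'

-- A's first loop (`prefix[i] = j` only fires on a match, but then j = 0, so the entry is j either way)
def buildPrefix (P : List Char) : List Nat :=
  ((List.range' 1 (P.length - 1)).foldl
    (fun (st : List Nat × Nat) i =>
      let j := kmpAdvance P st.1 (P.getD i ' ') st.2
      (st.1.set i j, j))
    (List.replicate P.length 0, 0)).1

-- A's main loop body; state = (candidate_index, level, kmp_state, levels)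
def stepA (T P : List Char) (f : List Nat) (st : Int × Int × Nat × List Int) (ci : Char × Nat) :
    Int × Int × Nat × List Int :=
  let level := if ci.1 = '(' then st.2.1 + 1 else if ci.1 = ')' then st.2.1 - 1 else st.2.1
  let levels := st.2.2.2.set ci.2 level
  let s := kmpAdvance P f ci.1 st.2.2.1
  if s = P.length then
    let candidate := ci.2 + 1 - P.length
    let cand :=
      if levels.getD candidate 0 = 0 then
        if (candidate = 0 ∨ (T.getD (candidate - 1) ' ') ∈ [' ', '(', ',', '\t']) ∧
           (candidate + P.length = T.length ∨ (T.getD (candidate + P.length) ' ') ∈ [' ', ')', '\t', ',']) then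
          (candidate : Int)
        else st.1
      else st.1
    (cand, level, f.getD (P.length - 1) 0, levels)
  else (st.1, level, s, levels)

def find_binary_op (expr : String) (op : String) : Option String × Option String :=
  let P := op.toList
  if P.length = 0 then (none, none) else
  let T := expr.toList
  let f := buildPrefix P
  let st := T.zipIdx.foldl (stepA T P f) (-1, 0, 0, List.replicate T.length 0)
  if st.1 = -1 then (none, none)
  else (some (String.ofList (PySem.Chars.strip (T.take st.1.toNat))),
        some (String.ofList (PySem.Chars.strip (T.drop (st.1.toNat + P.length)))))

-- ===== PORT B =====
-- B's first pass: the parenthesis-level list, one append per character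
def bLevels (T : List Char) : List Int :=
  (T.foldl (fun (acc : List Int × Int) c =>
    let lvl := if c = '(' then acc.2 + 1 else if c = ')' then acc.2 - 1 else acc.2
    (acc.1 ++ [lvl], lvl)) ([], 0)).1

-- B's `while True: pos = expr.find(op, start) …` loop; fuel len(expr)+1 covers every
-- iteration since start strictly increases and stays ≤ len(expr)
def bLoop (T P : List Char) (levels : List Int) : Nat → Nat → Int → Int
  | 0, _, best => best
  | fuel+1, start, best =>
    let pos := PySem.Chars.findFrom T P (start : Int)
    if pos = -1 then best
    else
      let p := pos.toNat
      let best' :=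
        if levels.getD p 0 = 0 then
          if (p = 0 ∨ (T.getD (p - 1) ' ') ∈ [' ', '(', ',', '\t']) ∧
             (p + P.length = T.length ∨ (T.getD (p + P.length) ' ') ∈ [' ', ')', '\t', ',']) then (p : Int)
          else best
        else best
      bLoop T P levels fuel (p + 1) best'

def find_binary_op_alt (expr : String) (op : String) : Option String × Option String :=
  let P := op.toList
  if P.length = 0 then (none, none) else
  let T := expr.toList
  let best := bLoop T P (bLevels T) (T.length + 1) 0 (-1)
  if best = -1 then (none, none)
  else (some (String.ofList (PySem.Chars.strip (T.take best.toNat))),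
        some (String.ofList (PySem.Chars.strip (T.drop (best.toNat + P.length)))))

-- ===== PRECONDITION & SPEC =====
def Spec_find_binary_op (expr : String) (op : String) (out : Option String × Option String) : Prop :=
  out = find_binary_op_alt expr op
instance (expr : String) (op : String) (out : Option String × Option String) :
    Decidable (Spec_find_binary_op expr op out) := by unfold Spec_find_binary_op; infer_instance

-- ===== CLAIM (what is proved, stated in full; the proofs are below) =====
def Claim_equal_find_binary_op : Prop :=
  ∀ (expr : String) (op : String), Dom_find_binary_op expr op →
    Spec_find_binary_op expr op (find_binary_op expr op)

-- ===== LEMMAS AND PROOFS =====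

-- ---- specification layer: parenthesis levels, occurrences, the common fold ----
def pstep (l : Int) (c : Char) : Int := if c = '(' then l + 1 else if c = ')' then l - 1 else l
def plvl (u : List Char) : Int := u.foldl pstep 0
def lvlAt (T : List Char) (p : Nat) : Int := plvl (T.take (p + 1))

def validB (T P : List Char) (p : Nat) : Bool :=
  if lvlAt T p = 0 then
    decide ((p = 0 ∨ (T.getD (p - 1) ' ') ∈ [' ', '(', ',', '\t']) ∧
            (p + P.length = T.length ∨ (T.getD (p + P.length) ' ') ∈ [' ', ')', '\t', ',']))
  else false

def occB (T P : List Char) (p : Nat) : Bool := decide (P <+: T.drop p)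
def occs (T P : List Char) (i : Nat) : List Nat := (List.range (i + 1 - P.length)).filter (occB T P)
def candStep (T P : List Char) (a : Int) (p : Nat) : Int := if validB T P p then (p : Int) else a
def candSpec (T P : List Char) (i : Nat) : Int := (occs T P i).foldl (candStep T P) (-1)

-- KMP specification values: failure function, running state, full-bound match detector
def fS (P : List Char) (i : Nat) : Nat := Nat.findGreatest (fun k => P.take k <:+ P.take (i + 1)) i
def sS (P t : List Char) : Nat := Nat.findGreatest (fun k => P.take k <:+ t) (P.length - 1)
def dS (P t : List Char) : Nat := Nat.findGreatest (fun k => P.take k <:+ t) P.length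
def wS (P : List Char) (c : Char) (s : Nat) : Nat :=
  Nat.findGreatest (fun j => P.take j <:+ P.take s ∧ (j = 0 ∨ P.getD j ' ' = c)) s

-- ---- generic list/findGreatest lemmas ----

lemma suffix_of_suffix_le {a b t : List Char} (ha : a <:+ t) (hb : b <:+ t)
    (h : a.length ≤ b.length) : a <:+ b := by
  have hal := ha.length_le
  have hbl := hb.length_le
  rw [List.suffix_iff_eq_drop] at ha hb ⊢
  conv_lhs => rw [ha]
  conv_rhs => rw [hb, List.drop_drop]
  congr 2
  rw [hb]
  simp only [List.length_drop]
  omega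

lemma concat_suffix_concat {a t : List Char} {x c : Char} :
    a ++ [x] <:+ t ++ [c] ↔ a <:+ t ∧ x = c := by
  constructor
  · rintro ⟨u, hu⟩
    have hx : x = c := by
      have := congrArg (fun l => l.getLast?) hu
      simpa using this
    subst hx
    have : u ++ a = t := by
      have h2 : (u ++ a) ++ [x] = t ++ [x] := by simpa using hu
      exact List.append_cancel_right h2
    exact ⟨⟨u, this⟩, rfl⟩
  · rintro ⟨⟨u, hu⟩, rfl⟩
    exact ⟨u, by simp [← hu]⟩

lemma take_succ_getD {P : List Char} {k : Nat} (h : k < P.length) :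
    P.take (k + 1) = P.take k ++ [P.getD k ' '] := by
  rw [List.take_add_one]
  congr 1
  simp [List.getElem?_eq_getElem h, List.getD]

lemma findGreatest_ext {Q R : Nat → Prop} [DecidablePred Q] [DecidablePred R] {n : Nat}
    (h : ∀ k ≤ n, (Q k ↔ R k)) : Nat.findGreatest Q n = Nat.findGreatest R n := by
  induction n with
  | zero => rfl
  | succ n ih =>
    rw [Nat.findGreatest_succ, Nat.findGreatest_succ]
    rw [ih (fun k hk => h k (by omega))]
    by_cases hq : Q (n+1)
    · rw [if_pos hq, if_pos ((h (n+1) le_rfl).mp hq)]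
    · rw [if_neg hq, if_neg (fun hr => hq ((h (n+1) le_rfl).mpr hr))]

lemma findGreatest_shrink {Q : Nat → Prop} [DecidablePred Q] {a b : Nat} (hab : a ≤ b)
    (h : ∀ k, a < k → k ≤ b → ¬ Q k) : Nat.findGreatest Q b = Nat.findGreatest Q a := by
  induction b with
  | zero => have : a = 0 := by omega
            subst this; rfl
  | succ b ih =>
    rcases Nat.eq_or_lt_of_le hab with rfl | hlt
    · rfl
    · rw [Nat.findGreatest_succ, if_neg (h (b+1) (by omega) le_rfl)]
      exact ih (by omega) (fun k hk1 hk2 => h k hk1 (by omega))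

lemma sorted_filter_cons {r : Nat} : ∀ (l : List Nat), l.Pairwise (· < ·) → r ∈ l →
    (∀ y ∈ l, r ≤ y) → l = r :: l.filter (fun p => decide (r + 1 ≤ p)) := by
  intro l hp hm hmin
  induction l with
  | nil => cases hm
  | cons a tl ih =>
    have hpa := (List.pairwise_cons.mp hp).1
    rcases List.mem_cons.mp hm with rfl | hmt
    · simp only [List.filter_cons]
      have h2 : ¬ (r + 1 ≤ r) := by omega
      simp [h2]
      exact (List.filter_eq_self.mpr (fun x hx => by simpa using (hpa x hx))).symm
    · exact absurd (hmin a (List.mem_cons_self)) (by have := hpa r hmt; omega)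

lemma getD_set_ne' {α : Type} {l : List α} {i k : Nat} {v d : α} (h : i ≠ k) :
    (l.set i v).getD k d = l.getD k d := by
  simp [List.getD, List.getElem?_set_ne h]

lemma getD_set_self' {α : Type} {l : List α} {i : Nat} {v d : α} (h : i < l.length) :
    (l.set i v).getD i d = v := by
  simp [List.getD, h]

-- ---- KMP correctness ----
lemma fS_le (P : List Char) (i : Nat) : fS P i ≤ i := Nat.findGreatest_le i

lemma fS_suffix (P : List Char) (i : Nat) : P.take (fS P i) <:+ P.take (i + 1) := by
  have h := Nat.findGreatest_spec (P := fun k => P.take k <:+ P.take (i + 1))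
    (Nat.zero_le i) (by simp)
  exact h

lemma wS_spec (P : List Char) (c : Char) (s : Nat) :
    P.take (wS P c s) <:+ P.take s ∧ (wS P c s = 0 ∨ P.getD (wS P c s) ' ' = c) := by
  have h := Nat.findGreatest_spec
    (P := fun j => P.take j <:+ P.take s ∧ (j = 0 ∨ P.getD j ' ' = c))
    (Nat.zero_le s) (by exact ⟨by simp, Or.inl rfl⟩)
  exact h

lemma wS_fall {P : List Char} {c : Char} {s : Nat} (hs : 0 < s) (hsm : s < P.length)
    (hc : c ≠ P.getD s ' ') : wS P c s = wS P c (fS P (s - 1)) := by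
  have hss : s - 1 + 1 = s := by omega
  have hble : fS P (s-1) ≤ s - 1 := fS_le P (s-1)
  have hbsuf : P.take (fS P (s-1)) <:+ P.take s := by
    have := fS_suffix P (s-1); rwa [hss] at this
  have hwle : wS P c (fS P (s-1)) ≤ fS P (s-1) := Nat.findGreatest_le _
  have hwspec := wS_spec P c (fS P (s-1))
  apply Nat.findGreatest_eq_iff.mpr
  refine ⟨by omega, fun _ => ⟨hwspec.1.trans hbsuf, hwspec.2⟩, ?_⟩
  intro k hk1 hk2 hQ
  obtain ⟨hk_suf, hk_alt⟩ := hQ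
  have hk0 : 0 < k := by omega
  have hkc : P.getD k ' ' = c := hk_alt.resolve_left (by omega)
  have hks : k ≠ s := fun h => hc (by rw [← h, hkc])
  have hkb : k ≤ fS P (s-1) := by
    by_contra hkb
    refine (Nat.findGreatest_is_greatest (P := fun k => P.take k <:+ P.take (s - 1 + 1))
      (n := s - 1) (k := k) ?_ (by omega)) (by rwa [hss])
    show fS P (s - 1) < k
    omega
  have hkbsuf : P.take k <:+ P.take (fS P (s-1)) := by
    apply suffix_of_suffix_le hk_suf hbsuf
    simp only [List.length_take]; omega
  refine Nat.findGreatest_is_greatest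
    (P := fun j => P.take j <:+ P.take (fS P (s - 1)) ∧ (j = 0 ∨ P.getD j ' ' = c))
    (n := fS P (s - 1)) (k := k) ?_ hkb ⟨hkbsuf, Or.inr hkc⟩
  show wS P c (fS P (s - 1)) < k
  omega

lemma kmpFall_eq {P : List Char} {f : List Nat} {c : Char} :
    ∀ (fuel s : Nat), s ≤ fuel → s < P.length →
    (∀ k, k < s → f.getD k 0 = fS P k) →
    kmpFall P f c fuel s = wS P c s := by
  intro fuel
  induction fuel with
  | zero =>
    intro s hs _ _
    have : s = 0 := by omega
    subst this; rfl
  | succ fuel ih =>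
    intro s hs hsm hf
    rw [kmpFall]
    split_ifs with h
    · obtain ⟨hs0, hcne⟩ := h
      rw [hf (s-1) (by omega)]
      rw [ih (fS P (s-1)) (by have := fS_le P (s-1); omega) (by have := fS_le P (s-1); omega)
        (fun k hk => hf k (by have := fS_le P (s-1); omega))]
      exact (wS_fall hs0 hsm hcne).symm
    · push Not at h
      rcases Nat.eq_zero_or_pos s with rfl | hs0
      · rfl
      · have hc := h hs0
        exact (Nat.findGreatest_eq_iff.mpr ⟨le_rfl,
          fun _ => ⟨List.suffix_refl _, Or.inr hc.symm⟩, fun k h1 h2 => by omega⟩).symm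

lemma kmpAdvance_eq {P t : List Char} {f : List Nat} {c : Char} {s : Nat}
    (hsm : s < P.length) (hf : ∀ k, k < s → f.getD k 0 = fS P k)
    (hsuf : P.take s <:+ t) :
    kmpAdvance P f c s = Nat.findGreatest (fun k => P.take k <:+ t ++ [c]) (s + 1) := by
  have hfall := kmpFall_eq (P := P) (f := f) (c := c) s s le_rfl hsm hf
  show (if c = P.getD (kmpFall P f c s s) ' ' then kmpFall P f c s s + 1
        else kmpFall P f c s s) = _
  rw [hfall]
  have hwle : wS P c s ≤ s := Nat.findGreatest_le _
  have hwspec := wS_spec P c s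
  have hdec : ∀ k, 0 < k → k ≤ s + 1 → (P.take k <:+ t ++ [c]) →
      P.take (k-1) <:+ P.take s ∧ P.getD (k-1) ' ' = c := by
    intro k hk0 hks hsufk
    have hkm : k - 1 < P.length := by omega
    have htk : P.take k = P.take (k-1) ++ [P.getD (k-1) ' '] := by
      have := take_succ_getD hkm
      rwa [Nat.sub_add_cancel hk0] at this
    rw [htk] at hsufk
    obtain ⟨h1, h2⟩ := concat_suffix_concat.mp hsufk
    refine ⟨?_, h2⟩
    apply suffix_of_suffix_le h1 hsuf
    simp only [List.length_take]; omega
  split_ifs with hcw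
  · apply (Nat.findGreatest_eq_iff.mpr ⟨by omega, ?_, ?_⟩).symm
    · intro _
      have hwm : wS P c s < P.length := by omega
      rw [take_succ_getD hwm, ← hcw]
      exact concat_suffix_concat.mpr ⟨hwspec.1.trans hsuf, rfl⟩
    · intro k hk1 hk2 hQ
      obtain ⟨h1, h2⟩ := hdec k (by omega) hk2 hQ
      refine Nat.findGreatest_is_greatest
        (P := fun j => P.take j <:+ P.take s ∧ (j = 0 ∨ P.getD j ' ' = c))
        (n := s) (k := k - 1) ?_ (by omega) ⟨h1, Or.inr h2⟩
      show wS P c s < k - 1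
      omega
  · have hw0 : wS P c s = 0 := by
      rcases hwspec.2 with h | h
      · exact h
      · exact absurd h.symm hcw
    rw [hw0]
    apply (Nat.findGreatest_eq_iff.mpr ⟨by omega, by omega, ?_⟩).symm
    intro k hk1 hk2 hQ
    obtain ⟨h1, h2⟩ := hdec k (by omega) hk2 hQ
    rcases Nat.eq_zero_or_pos (k-1) with he | hpos
    · rw [he] at h2
      rw [hw0] at hcw
      exact hcw h2.symm
    · refine Nat.findGreatest_is_greatest
        (P := fun j => P.take j <:+ P.take s ∧ (j = 0 ∨ P.getD j ' ' = c))
        (n := s) (k := k - 1) ?_ (by omega) ⟨h1, Or.inr h2⟩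
      show wS P c s < k - 1
      omega

lemma fS_step {P : List Char} {i : Nat} (hi : i + 1 < P.length) :
    fS P (i + 1) = Nat.findGreatest (fun k => P.take k <:+ P.take (i + 1) ++ [P.getD (i+1) ' ']) (fS P i + 1) := by
  have h1 : fS P (i + 1) = Nat.findGreatest (fun k => P.take k <:+ P.take (i + 1 + 1)) (i + 1) := rfl
  rw [h1, show P.take (i+1) ++ [P.getD (i+1) ' '] = P.take (i+1+1) from (take_succ_getD hi).symm]
  apply findGreatest_shrink (by have := fS_le P i; omega)
  intro k hk1 hk2 hQ
  have hk1' : 1 ≤ k := by omega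
  have hkm : k - 1 < P.length := by omega
  have htk : P.take k = P.take (k-1) ++ [P.getD (k-1) ' '] := by
    have := take_succ_getD hkm
    rwa [Nat.sub_add_cancel hk1'] at this
  rw [htk, take_succ_getD (by omega : i + 1 < P.length)] at hQ
  obtain ⟨hsfx, _⟩ := concat_suffix_concat.mp hQ
  have : k - 1 ≤ fS P i := by
    by_contra hc
    refine Nat.findGreatest_is_greatest (P := fun k => P.take k <:+ P.take (i + 1))
      (n := i) (k := k - 1) ?_ (by omega) hsfx
    show fS P i < k - 1
    omega
  omega

def BuildInv (P : List Char) (i : Nat) (st : List Nat × Nat) : Prop :=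
  st.1.length = P.length ∧ st.2 = fS P i ∧ (∀ k, k ≤ i → st.1.getD k 0 = fS P k) ∧
  (∀ k, i < k → st.1.getD k 0 = 0)

lemma build_inv {P : List Char} (hm : 0 < P.length) :
    ∀ i, i ≤ P.length - 1 →
      BuildInv P i ((List.range' 1 i).foldl
        (fun (st : List Nat × Nat) i =>
          let j := kmpAdvance P st.1 (P.getD i ' ') st.2
          (st.1.set i j, j)) (List.replicate P.length 0, 0)) := by
  intro i
  induction i with
  | zero =>
    intro _
    rw [List.range'_zero]
    simp only [List.foldl_nil]
    have hrep : ∀ k : Nat, (List.replicate P.length (0:Nat)).getD k 0 = 0 := by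
      intro k
      simp [List.getD, List.getElem?_replicate]
      split <;> simp
    refine ⟨by simp, rfl, ?_, fun k _ => hrep k⟩
    intro k hk
    have hk0 : k = 0 := by omega
    subst hk0
    rw [hrep 0]
    rfl
  | succ i ih =>
    intro hi1
    have hinv := ih (by omega)
    set st := (List.range' 1 i).foldl
      (fun (st : List Nat × Nat) i =>
        let j := kmpAdvance P st.1 (P.getD i ' ') st.2
        (st.1.set i j, j)) (List.replicate P.length 0, 0) with hst
    obtain ⟨hlen, hj, hk_le, hk_gt⟩ := hinv
    rw [List.range'_concat, List.foldl_append]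
    simp only [List.foldl_cons, List.foldl_nil]
    rw [show (1:Nat) + 1 * i = i + 1 by omega, ← hst]
    have hadv : kmpAdvance P st.1 (P.getD (i+1) ' ') st.2 = fS P (i + 1) := by
      rw [hj, kmpAdvance_eq (t := P.take (i + 1)) (by have := fS_le P i; omega)
        (fun k hk => hk_le k (by have := fS_le P i; omega)) (fS_suffix P i)]
      exact (fS_step (by omega)).symm
    rw [hadv]
    refine ⟨by simpa using hlen, rfl, ?_, ?_⟩
    · intro k hk
      rcases Nat.eq_or_lt_of_le hk with he | hlt
      · subst he
        exact getD_set_self' (by omega)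
      · show (st.1.set (i+1) _).getD k 0 = fS P k
        rw [getD_set_ne' (by omega)]
        exact hk_le k (by omega)
    · intro k hk
      show (st.1.set (i+1) _).getD k 0 = 0
      rw [getD_set_ne' (by omega)]
      exact hk_gt k (by omega)

lemma buildPrefix_getD {P : List Char} (hm : 0 < P.length) :
    ∀ k, k < P.length → (buildPrefix P).getD k 0 = fS P k := by
  intro k hk
  have := build_inv hm (P.length - 1) le_rfl
  obtain ⟨_, _, hle, _⟩ := this
  exact hle k (by omega)

lemma occ_iff_suffix {T P : List Char} {p : Nat} (h : p + P.length ≤ T.length) :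
    (P <+: T.drop p) ↔ P <:+ T.take (p + P.length) := by
  rw [List.prefix_iff_eq_take, List.suffix_iff_eq_drop]
  have hlen : (T.take (p + P.length)).length = p + P.length := by
    simp; omega
  rw [hlen]
  have h2 : p + P.length - P.length = p := by omega
  rw [h2, List.drop_take]
  have h3 : p + P.length - p = P.length := by omega
  rw [h3]

-- ---- A's main loop ----
lemma sS_le (P t : List Char) : sS P t ≤ P.length - 1 := Nat.findGreatest_le _

lemma sS_suffix (P t : List Char) : P.take (sS P t) <:+ t := by
  have h := Nat.findGreatest_spec (P := fun k => P.take k <:+ t) (Nat.zero_le (P.length - 1))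
    (by simp)
  exact h

lemma dS_eq_len_iff {P u : List Char} : dS P u = P.length ↔ P <:+ u := by
  constructor
  · intro h
    rcases Nat.eq_zero_or_pos P.length with h0 | h0
    · have : P = [] := List.length_eq_zero_iff.mp h0
      simp [this]
    · have := (Nat.findGreatest_eq_iff.mp h).2.1 (by omega)
      simpa [List.take_length] using this
  · intro h
    have h1 : P.length ≤ dS P u :=
      Nat.le_findGreatest le_rfl (by simpa [List.take_length] using h)
    have h2 : dS P u ≤ P.length := Nat.findGreatest_le _
    omega

lemma sS_of_match {P u : List Char} (hm : 0 < P.length) (hmatch : P <:+ u) :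
    sS P u = fS P (P.length - 1) := by
  unfold sS fS
  apply findGreatest_ext
  intro k hk
  rw [show P.length - 1 + 1 = P.length by omega, List.take_length]
  constructor
  · intro h
    exact suffix_of_suffix_le h hmatch (by simp)
  · intro h
    exact h.trans hmatch

lemma sS_eq_dS_of_ne {P u : List Char} (hm : 0 < P.length) (h : dS P u ≠ P.length) :
    sS P u = dS P u := by
  have hq : ¬ (P <:+ u) := fun hh => h (dS_eq_len_iff.mpr hh)
  unfold sS dS
  rw [show P.length = (P.length - 1) + 1 by omega, Nat.findGreatest_succ,
    if_neg (by rw [show P.length - 1 + 1 = P.length by omega, List.take_length]; exact hq),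
    Nat.add_sub_cancel]

-- the advance inside A's main loop computes the full-bound match detector
lemma advance_dS {T P : List Char} {f : List Nat} {c : Char} {i : Nat}
    (hm : 0 < P.length) (hf : ∀ k, k < P.length → f.getD k 0 = fS P k)
    (htake : T.take (i + 1) = T.take i ++ [c]) :
    kmpAdvance P f c (sS P (T.take i)) = dS P (T.take (i + 1)) := by
  rw [kmpAdvance_eq (t := T.take i) (by have := sS_le P (T.take i); omega)
      (fun k hk => hf k (by have := sS_le P (T.take i); omega)) (sS_suffix P (T.take i))]
  rw [← htake]
  unfold dS
  refine (findGreatest_shrink (by have := sS_le P (T.take i); omega) ?_).symm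
  intro k hk1 hk2 hQ
  have hk0 : 0 < k := by omega
  have hkm : k - 1 < P.length := by omega
  have htk : P.take k = P.take (k-1) ++ [P.getD (k-1) ' '] := by
    have := take_succ_getD hkm
    rwa [Nat.sub_add_cancel hk0] at this
  rw [htake, htk] at hQ
  obtain ⟨h1, _⟩ := concat_suffix_concat.mp hQ
  have : k - 1 ≤ sS P (T.take i) := by
    by_contra hc
    refine Nat.findGreatest_is_greatest (P := fun k => P.take k <:+ T.take i)
      (n := P.length - 1) (k := k - 1) ?_ (by omega) h1
    show sS P (T.take i) < k - 1
    omega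
  omega

-- port's nested ifs = candStep
lemma candStep_eq (T P : List Char) (a : Int) (p : Nat) :
    (if lvlAt T p = 0 then
       if (p = 0 ∨ (T.getD (p - 1) ' ') ∈ [' ', '(', ',', '\t']) ∧
          (p + P.length = T.length ∨ (T.getD (p + P.length) ' ') ∈ [' ', ')', '\t', ',']) then (p : Int)
       else a
     else a) = candStep T P a p := by
  unfold candStep validB
  split_ifs <;> simp_all

def InvA (T P : List Char) (i : Nat) (st : Int × Int × Nat × List Int) : Prop :=
  st.1 = candSpec T P i ∧ st.2.1 = plvl (T.take i) ∧ st.2.2.1 = sS P (T.take i) ∧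
  st.2.2.2.length = T.length ∧ (∀ p, p < i → st.2.2.2.getD p 0 = lvlAt T p)

lemma stepA_inv {T P : List Char} {f : List Nat} (hm : 0 < P.length)
    (hf : ∀ k, k < P.length → f.getD k 0 = fS P k) {i : Nat} {c : Char}
    {st : Int × Int × Nat × List Int}
    (hci : T[i]? = some c) (hin : i < T.length) (hinv : InvA T P i st) :
    InvA T P (i + 1) (stepA T P f st (c, i)) := by
  obtain ⟨hcand, hlvl, hs, hlen, hlevs⟩ := hinv
  have htake : T.take (i + 1) = T.take i ++ [c] := by
    rw [List.take_add_one, hci]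
    rfl
  have hlvl1 : pstep (plvl (T.take i)) c = lvlAt T i := by
    unfold lvlAt plvl
    rw [htake, List.foldl_append]
    rfl
  have hlevel : (if c = '(' then st.2.1 + 1 else if c = ')' then st.2.1 - 1 else st.2.1)
      = lvlAt T i := by
    rw [hlvl, ← hlvl1]
    unfold pstep
    rfl
  have hadv : kmpAdvance P f c st.2.2.1 = dS P (T.take (i + 1)) := by
    rw [hs]; exact advance_dS hm hf htake
  have hlevset : ∀ p, p < i + 1 →
      (st.2.2.2.set i (lvlAt T i)).getD p 0 = lvlAt T p := by
    intro p hp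
    rcases Nat.lt_or_ge p i with h | h
    · rw [getD_set_ne' (by omega)]
      exact hlevs p h
    · have : p = i := by omega
      subst this
      exact getD_set_self' (by omega)
  unfold stepA
  simp only []
  simp only [hlevel, hadv]
  by_cases hmat : dS P (T.take (i + 1)) = P.length
  · rw [if_pos hmat]
    have hmatch : P <:+ T.take (i + 1) := dS_eq_len_iff.mp hmat
    have hmlen : P.length ≤ i + 1 := by
      have := hmatch.length_le
      simp at this
      omega
    have hpm : (i + 1 - P.length) + P.length = i + 1 := by omega
    have hocc : occB T P (i + 1 - P.length) = true := by
      unfold occB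
      rw [decide_eq_true_iff, occ_iff_suffix (by omega), hpm]
      exact hmatch
    have hoccs : occs T P (i + 1) = occs T P i ++ [i + 1 - P.length] := by
      unfold occs
      rw [show i + 1 + 1 - P.length = (i + 1 - P.length) + 1 by omega, List.range_succ,
        List.filter_append]
      simp [hocc]
    refine ⟨?_, ?_, ?_, by simpa using hlen, hlevset⟩
    · show (if (st.2.2.2.set i (lvlAt T i)).getD (i + 1 - P.length) 0 = 0 then _ else _) = _
      rw [hlevset (i + 1 - P.length) (by omega), hcand]
      unfold candSpec
      rw [hoccs, List.foldl_append]
      simp only [List.foldl_cons, List.foldl_nil]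
      exact candStep_eq T P (candSpec T P i) (i + 1 - P.length)
    · rfl
    · show f.getD (P.length - 1) 0 = sS P (T.take (i + 1))
      rw [hf (P.length - 1) (by omega), sS_of_match hm hmatch]
  · rw [if_neg hmat]
    have hnomatch : ¬ P <:+ T.take (i + 1) := fun h => hmat (dS_eq_len_iff.mpr h)
    have hoccs : occs T P (i + 1) = occs T P i := by
      unfold occs
      rcases Nat.lt_or_ge (i + 1) P.length with h | h
      · rw [show i + 1 + 1 - P.length = i + 1 - P.length by omega]
      · have hocc : occB T P (i + 1 - P.length) = false := by
          unfold occB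
          rw [decide_eq_false_iff_not, occ_iff_suffix (by omega),
            show (i + 1 - P.length) + P.length = i + 1 by omega]
          exact hnomatch
        rw [show i + 1 + 1 - P.length = (i + 1 - P.length) + 1 by omega, List.range_succ,
          List.filter_append]
        simp [hocc]
    refine ⟨?_, rfl, ?_, by simpa using hlen, hlevset⟩
    · show st.1 = candSpec T P (i + 1)
      rw [hcand]
      unfold candSpec
      rw [hoccs]
    · show dS P (T.take (i + 1)) = sS P (T.take (i + 1))
      exact (sS_eq_dS_of_ne hm hmat).symm

lemma foldA_inv {T P : List Char} {f : List Nat} (hm : 0 < P.length)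
    (hf : ∀ k, k < P.length → f.getD k 0 = fS P k) :
    ∀ (u : List Char) (i : Nat) (st : Int × Int × Nat × List Int), T.drop i = u →
      InvA T P i st → InvA T P (i + u.length) ((u.zipIdx i).foldl (stepA T P f) st) := by
  intro u
  induction u with
  | nil => intro i st _ hinv; simpa using hinv
  | cons c u ih =>
    intro i st hdrop hinv
    have hin : i < T.length := by
      by_contra h
      rw [List.drop_eq_nil_of_le (by omega)] at hdrop
      exact (List.cons_ne_nil c u) hdrop.symm
    have hci : T[i]? = some c := by
      have h0 : (T.drop i)[0]? = some c := by rw [hdrop]; rfl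
      rwa [List.getElem?_drop, Nat.add_zero] at h0
    have hdrop' : T.drop (i + 1) = u := by
      have : T.drop (i + 1) = (T.drop i).drop 1 := by
        rw [List.drop_drop]
      rw [this, hdrop]
      rfl
    rw [List.zipIdx_cons, List.foldl_cons]
    have := ih (i + 1) (stepA T P f st (c, i)) hdrop' (stepA_inv hm hf hci hin hinv)
    simpa [Nat.add_comm, Nat.add_assoc, Nat.add_left_comm] using this

-- ---- B's loops ----
-- B's level list
def lscan : List Char → Int → List Int
  | [], _ => []
  | c :: u, l => pstep l c :: lscan u (pstep l c)

lemma lscan_length (u : List Char) (l : Int) : (lscan u l).length = u.length := by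
  induction u generalizing l with
  | nil => rfl
  | cons c u ih => simp [lscan, ih]

lemma lscan_getD (u : List Char) : ∀ (l : Int) (p : Nat), p < u.length →
    (lscan u l).getD p 0 = (u.take (p + 1)).foldl pstep l := by
  induction u with
  | nil => intro l p hp; simp at hp
  | cons c u ih =>
    intro l p hp
    cases p with
    | zero => simp [lscan, List.getD]
    | succ p =>
      have := ih (pstep l c) p (by simpa using hp)
      simpa [lscan, List.getD] using this

lemma bfold_eq : ∀ (u : List Char) (acc : List Int × Int),
    (u.foldl (fun (acc : List Int × Int) c =>
      let lvl := if c = '(' then acc.2 + 1 else if c = ')' then acc.2 - 1 else acc.2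
      (acc.1 ++ [lvl], lvl)) acc) = (acc.1 ++ lscan u acc.2, u.foldl pstep acc.2) := by
  intro u
  induction u with
  | nil => intro acc; simp [lscan]
  | cons c u ih =>
    intro acc
    rw [List.foldl_cons, ih]
    simp [lscan, pstep, List.append_assoc]

lemma bLevels_spec (T : List Char) :
    (bLevels T).length = T.length ∧ ∀ p, p < T.length → (bLevels T).getD p 0 = lvlAt T p := by
  unfold bLevels
  rw [bfold_eq]
  constructor
  · simp [lscan_length]
  · intro p hp
    simpa [lscan_getD T 0 p hp] using (lscan_getD T 0 p hp)

lemma prefix_drop_infix {T P : List Char} {p start : Nat}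
    (h1 : P <+: T.drop p) (hsp : start ≤ p) : P <:+: T.drop start := by
  have h2 : T.drop p <:+ T.drop start := by
    have h3 := List.drop_suffix (p - start) (T.drop start)
    rwa [List.drop_drop, show start + (p - start) = p by omega] at h3
  exact h1.isInfix.trans h2.isInfix

lemma bLoop_eq {T P : List Char} {levels : List Int} (hm : 0 < P.length)
    (hlev : ∀ p, p < T.length → levels.getD p 0 = lvlAt T p) :
    ∀ (fuel start : Nat) (best : Int), start ≤ T.length → T.length + 1 - start ≤ fuel →
      bLoop T P levels fuel start best =
        (((List.range (T.length + 1 - P.length)).filter (occB T P)).filter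
          (fun p => decide (start ≤ p))).foldl (candStep T P) best := by
  intro fuel
  induction fuel with
  | zero => intro start best h1 h2; omega
  | succ fuel ih =>
    intro start best hs hfuel
    rw [bLoop]
    by_cases hneg : PySem.Chars.findFrom T P (start : Int) = -1
    · rw [if_pos hneg]
      have hinfix : ¬ P <:+: T.drop start :=
        (PySem.Chars.findFrom_natCast_eq_neg_one_iff T P start hs).mp hneg
      have hnil : (((List.range (T.length + 1 - P.length)).filter (occB T P)).filter
          (fun p => decide (start ≤ p))) = [] := by
        apply List.filter_eq_nil_iff.mpr
        intro p hp hdec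
        have hocc : P <+: T.drop p := by
          have := (List.mem_filter.mp hp).2
          unfold occB at this
          exact of_decide_eq_true this
        exact hinfix (prefix_drop_infix hocc (by simpa using hdec))
      rw [hnil]
      rfl
    · rw [if_neg hneg]
      obtain ⟨hge, hpre, hmin⟩ := PySem.Chars.findFrom_natCast_spec T P start hs hneg
      have hpos0 : (0:Int) ≤ PySem.Chars.findFrom T P (start : Int) :=
        le_trans (by exact_mod_cast Nat.zero_le start) hge
      set pn := (PySem.Chars.findFrom T P (start : Int)).toNat with hpn
      have hplen : P.length ≤ (T.drop pn).length := hpre.length_le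
      have hple : pn + P.length ≤ T.length := by
        simp only [List.length_drop] at hplen
        rcases Nat.lt_or_ge pn T.length with h | h
        · omega
        · rw [List.drop_eq_nil_of_le h] at hpre
          have := hpre.length_le
          simp at this
          omega
      have hstart_le : start ≤ pn := by omega
      have hpair : (((List.range (T.length + 1 - P.length)).filter (occB T P)).filter
          (fun p => decide (start ≤ p))).Pairwise (· < ·) :=
        (((List.pairwise_lt_range).filter _).filter _)
      have hmem : pn ∈ (((List.range (T.length + 1 - P.length)).filter (occB T P)).filter
          (fun p => decide (start ≤ p))) := by
        apply List.mem_filter.mpr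
        refine ⟨List.mem_filter.mpr ⟨List.mem_range.mpr (by omega), ?_⟩, by simpa using hstart_le⟩
        unfold occB
        exact decide_eq_true hpre
      have hminL : ∀ y ∈ (((List.range (T.length + 1 - P.length)).filter (occB T P)).filter
          (fun p => decide (start ≤ p))), pn ≤ y := by
        intro y hy
        have hys : start ≤ y := by simpa using (List.mem_filter.mp hy).2
        have hyo : P <+: T.drop y := by
          have := (List.mem_filter.mp (List.mem_filter.mp hy).1).2
          unfold occB at this
          exact of_decide_eq_true this
        by_contra hc
        exact hmin y hys (by omega) hyo
      have hcons := sorted_filter_cons _ hpair hmem hminL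
      show bLoop T P levels fuel (pn + 1)
        (if levels.getD pn 0 = 0 then
          if (pn = 0 ∨ (T.getD (pn - 1) ' ') ∈ [' ', '(', ',', '	']) ∧
             (pn + P.length = T.length ∨ (T.getD (pn + P.length) ' ') ∈ [' ', ')', '	', ',']) then (pn : Int)
          else best
         else best) = _
      rw [hcons, List.foldl_cons]
      have hbest' : (if levels.getD pn 0 = 0 then
          if (pn = 0 ∨ (T.getD (pn - 1) ' ') ∈ [' ', '(', ',', '\t']) ∧
             (pn + P.length = T.length ∨ (T.getD (pn + P.length) ' ') ∈ [' ', ')', '\t', ',']) then (pn : Int)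
          else best
        else best) = candStep T P best pn := by
        rw [hlev pn (by omega)]
        exact candStep_eq T P best pn
      rw [hbest']
      have hfilter : ((((List.range (T.length + 1 - P.length)).filter (occB T P)).filter
          (fun p => decide (start ≤ p))).filter (fun p => decide (pn + 1 ≤ p))) =
          (((List.range (T.length + 1 - P.length)).filter (occB T P)).filter
            (fun p => decide (pn + 1 ≤ p))) := by
        rw [List.filter_filter]
        apply List.filter_congr
        intro a _
        by_cases h : pn + 1 ≤ a
        · have h2 : start ≤ a := by omega
          simp [h, h2]
        · simp [h]
      rw [hfilter]
      exact ih (pn + 1) (candStep T P best pn) (by omega) (by omega)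


-- ===== VERDICT (by name: the statement is the Claim_ definition above) =====
lemma candSpec_zero {T P : List Char} (hm : 0 < P.length) : candSpec T P 0 = -1 := by
  unfold candSpec occs
  rw [show 0 + 1 - P.length = 0 by omega]
  rfl

lemma sS_nil {P : List Char} (hm : 0 < P.length) {T : List Char} : sS P (T.take 0) = 0 := by
  apply Nat.findGreatest_eq_iff.mpr
  refine ⟨Nat.zero_le _, fun h => absurd rfl h, ?_⟩
  intro k h1 h2 hsuf
  rw [List.take_zero] at hsuf
  have hnil := List.suffix_nil.mp hsuf
  have hlen := congrArg List.length hnil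
  rw [List.length_take, List.length_nil] at hlen
  omega

-- ===== VERDICT (by name: the statement is the Claim_ definition above) =====
theorem find_binary_op_spec : Claim_equal_find_binary_op := by
  intro expr op _
  unfold Spec_find_binary_op
  show find_binary_op expr op = find_binary_op_alt expr op
  simp only [find_binary_op, find_binary_op_alt]
  by_cases hm0 : op.toList.length = 0
  · rw [if_pos hm0, if_pos hm0]
  · rw [if_neg hm0, if_neg hm0]
    set T := expr.toList with hT
    set P := op.toList with hP
    have hm : 0 < P.length := by omega
    have hf : ∀ k, k < P.length → (buildPrefix P).getD k 0 = fS P k :=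
      buildPrefix_getD hm
    have hInv0 : InvA T P 0 (-1, 0, 0, List.replicate T.length 0) := by
      refine ⟨candSpec_zero hm |>.symm, rfl, (sS_nil hm).symm, by simp,
        fun p hp => absurd hp (Nat.not_lt_zero p)⟩
    have hA := (foldA_inv hm hf T 0
      (-1, 0, 0, List.replicate T.length 0) List.drop_zero hInv0).1
    rw [Nat.zero_add] at hA
    have hB := bLoop_eq hm (bLevels_spec T).2 (T.length + 1) 0 (-1)
      (Nat.zero_le _) (by omega)
    rw [List.filter_eq_self.mpr (fun a _ => by simp)] at hB
    rw [hA, hB]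
    rfl
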